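-- pv_equiv track=rewrite | github.com/Code-Valleo/Tetraminos | Tetraminos.py | limits
-- ===== SOURCE A (Python) =====
-- def limits(tetramino, mouvement, grid) -> bool:
--     """
--     Fonction pour définir les limites de la grille pour empecher les tetraminos d'avoir des coordonnées negatives et
--     donc sortir de la grille
--     :param tetramino:les coordonnées d'un tetramino
--     :param mouvement: le mouvement que l'utilisateur veut effectuer
--     :param grid:la grille pour connaitre sa taille et donc ses limites
--     :return: un booleen qui dit si la position du tetraminos est hors limites ou non
--     """
--     for coor_tuple in mouvement:
--         x = int(coor_tuple[0])
--         y = int(coor_tuple[1])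
--         decx = tetramino[1][1][0]
--         decy = tetramino[1][1][1]
--         if x + decx < 0 or y + decy < 0:
--             return False
--         if y + decy > len(grid) - 1:  # le - 1 car la len de la grille est 1 plus grand que la taille en indice de la
--             # grille car les indices commencent par 0
--             return False
--         for i in grid:
--             for j in grid:
--                 if x + decx > len(j) - 1:  # le - 1 car la len de la grille est 1 plus grand que la taille en indice de
--                     # la grille car les indices commencent par 0
--                     return False
--     return True
-- ===== SOURCE B (Python) =====
-- def limits(tetramino, mouvement, grid) -> bool:
--     if not mouvement:
--         return True
--     decx = tetramino[1][1][0]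
--     decy = tetramino[1][1][1]
--     if not grid:
--         return False
--     w = min(len(row) for row in grid)
--     h = len(grid)
--     for x, y in mouvement:
--         x = int(x)
--         y = int(y)
--         if x + decx < 0 or y + decy < 0 or y + decy > h - 1 or x + decx > w - 1:
--             return False
--     return True
-- ===== Notes on version B (the rewrite author's own statement) =====
-- stated objective: alternative
-- what changed: Precomputes the minimum row width and the tetromino offsets once, replacing A's per-movement double loop over the whole grid with a single bounds comparison per movement (intended as faster, O(M+G) vs O(M*G^2); a timing run measured only ~1.5x inconsistently).
import Mathlib
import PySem

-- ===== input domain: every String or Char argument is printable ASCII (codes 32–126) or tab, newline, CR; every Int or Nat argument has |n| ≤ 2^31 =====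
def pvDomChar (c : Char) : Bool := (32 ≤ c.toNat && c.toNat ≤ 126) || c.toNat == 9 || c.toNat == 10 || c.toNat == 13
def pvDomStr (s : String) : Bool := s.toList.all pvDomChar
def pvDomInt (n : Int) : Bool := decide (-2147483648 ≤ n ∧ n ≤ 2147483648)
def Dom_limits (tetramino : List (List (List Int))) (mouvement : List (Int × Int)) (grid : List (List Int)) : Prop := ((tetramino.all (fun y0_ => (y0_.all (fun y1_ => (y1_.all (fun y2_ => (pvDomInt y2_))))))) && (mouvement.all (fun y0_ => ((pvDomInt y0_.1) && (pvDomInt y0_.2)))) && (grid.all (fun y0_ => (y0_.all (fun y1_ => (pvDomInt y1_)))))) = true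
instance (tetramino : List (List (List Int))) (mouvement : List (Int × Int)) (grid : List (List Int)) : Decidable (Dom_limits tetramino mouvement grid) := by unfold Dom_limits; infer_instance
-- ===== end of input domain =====

-- B precomputes the minimum row width and the offsets once and does a single bounds
-- comparison per movement instead of A's per-movement double grid loop (objective: alternative).

-- ===== PORT A =====
-- the loop 'for coor_tuple in mouvement: …' of A; early 'return False' = value false
def limitsLoopA (tetramino : List (List (List Int))) (grid : List (List Int)) :
    List (Int × Int) → Bool
  | [] => true
  | p :: rest =>
    let x : Int := p.1              -- int(coor_tuple[0]) on an int is the identity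
    let y : Int := p.2
    let decx : Int := ((tetramino.getD 1 []).getD 1 []).getD 0 0   -- tetramino[1][1][0]; Pre_ guarantees the indices exist
    let decy : Int := ((tetramino.getD 1 []).getD 1 []).getD 1 0   -- tetramino[1][1][1]
    if x + decx < 0 ∨ y + decy < 0 then false
    else if y + decy > (grid.length : Int) - 1 then false
    else if grid.any (fun _ => grid.any (fun j => decide (x + decx > (j.length : Int) - 1))) then false
    else limitsLoopA tetramino grid rest

def limits (tetramino : List (List (List Int))) (mouvement : List (Int × Int)) (grid : List (List Int)) : Bool :=
  limitsLoopA tetramino grid mouvement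

-- ===== PORT B =====
def limits_alt (tetramino : List (List (List Int))) (mouvement : List (Int × Int)) (grid : List (List Int)) : Bool :=
  match mouvement with
  | [] => true
  | _ :: _ =>
    let decx : Int := ((tetramino.getD 1 []).getD 1 []).getD 0 0
    let decy : Int := ((tetramino.getD 1 []).getD 1 []).getD 1 0
    match grid with
    | [] => false
    | r :: rs =>
      let w : Nat := rs.foldl (fun acc row => min acc row.length) r.length   -- min(len(row) for row in grid)
      let h : Int := ((r :: rs).length : Int)
      mouvement.all (fun p =>
        !(decide (p.1 + decx < 0) || decide (p.2 + decy < 0) ||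
          decide (p.2 + decy > h - 1) || decide (p.1 + decx > (w : Int) - 1)))

-- ===== PRECONDITION & SPEC =====
-- Pre_ excludes exactly the inputs on which Python A raises IndexError:
-- a nonempty mouvement while tetramino[1][1][0] / tetramino[1][1][1] do not exist.
def Pre_limits (tetramino : List (List (List Int))) (mouvement : List (Int × Int)) (grid : List (List Int)) : Prop :=
  mouvement ≠ [] →
    (1 < tetramino.length ∧ 1 < (tetramino.getD 1 []).length ∧
      1 < ((tetramino.getD 1 []).getD 1 []).length)
instance (tetramino : List (List (List Int))) (mouvement : List (Int × Int)) (grid : List (List Int)) : Decidable (Pre_limits tetramino mouvement grid) := by unfold Pre_limits; infer_instance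
def pvWitness_limits : List (List (List Int)) × (List (Int × Int)) × List (List Int) :=
  ([[[0, 0], [0, 0]], [[0, 0], [1, 0]]], [(0, 0), (1, 1)], [[0, 0], [0, 0]])

def Spec_limits (tetramino : List (List (List Int))) (mouvement : List (Int × Int)) (grid : List (List Int)) (out : Bool) : Prop := out = limits_alt tetramino mouvement grid
instance (tetramino : List (List (List Int))) (mouvement : List (Int × Int)) (grid : List (List Int)) (out : Bool) : Decidable (Spec_limits tetramino mouvement grid out) := by unfold Spec_limits; infer_instance

-- ===== CLAIM (what is proved, stated in full; the proofs are below) =====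
def Claim_equal_limits : Prop := ∀ (tetramino : List (List (List Int))) (mouvement : List (Int × Int)) (grid : List (List Int)), Dom_limits tetramino mouvement grid → Pre_limits tetramino mouvement grid → Spec_limits tetramino mouvement grid (limits tetramino mouvement grid)

-- ===== LEMMAS AND PROOFS =====

-- the folded minimum of the row widths is ≤ x iff some width is ≤ x
theorem pv_minfold_le (rs : List (List Int)) (a : Nat) (x : Int) :
    ((rs.foldl (fun acc row => min acc row.length) a : Nat) : Int) ≤ x ↔
      ((a : Int) ≤ x ∨ ∃ r ∈ rs, ((r.length : Int) ≤ x)) := by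
  induction rs generalizing a with
  | nil => simp
  | cons hd tl ih =>
    simp only [List.foldl_cons, ih, Nat.cast_min, min_le_iff, List.mem_cons]
    constructor
    · rintro (h | ⟨r, hr, hle⟩)
      · rcases h with h | h
        · exact Or.inl h
        · exact Or.inr ⟨hd, Or.inl rfl, h⟩
      · exact Or.inr ⟨r, Or.inr hr, hle⟩
    · rintro (h | ⟨r, hr, hle⟩)
      · exact Or.inl (Or.inl h)
      · rcases hr with rfl | hr
        · exact Or.inl (Or.inr hle)
        · exact Or.inr ⟨r, hr, hle⟩

-- A's double grid loop over a nonempty grid equals a single comparison with the min width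
theorem pv_inner_eq (r : List Int) (rs : List (List Int)) (xd : Int) :
    ((r :: rs).any (fun _ => (r :: rs).any (fun j => decide (xd > (j.length : Int) - 1)))) =
      decide (xd > ((rs.foldl (fun acc row => min acc row.length) r.length : Nat) : Int) - 1) := by
  have hconst : ∀ (c : Bool), ((r :: rs).any (fun _ => c)) = c := by
    intro c; cases c <;> simp
  rw [hconst, Bool.eq_iff_iff]
  simp only [List.any_eq_true, decide_eq_true_eq]
  have h := pv_minfold_le rs r.length xd
  constructor
  · rintro ⟨j, hj, hgt⟩
    have hle : (j.length : Int) ≤ xd := by omega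
    rcases List.mem_cons.mp hj with rfl | hj
    · have := h.mpr (Or.inl hle); omega
    · have := h.mpr (Or.inr ⟨j, hj, hle⟩); omega
  · intro hgt
    have := h.mp (by omega)
    rcases this with hle | ⟨j, hj, hle⟩
    · exact ⟨r, List.mem_cons_self, by omega⟩
    · exact ⟨j, List.mem_cons.mpr (Or.inr hj), by omega⟩

-- the early-return if-chain of one loop iteration, as one boolean conjunct
theorem pv_chain (c1 c2 c3 c4 : Prop) [Decidable c1] [Decidable c2] [Decidable c3] [Decidable c4]
    (rest : Bool) :
    (if c1 ∨ c2 then false else if c3 then false else if decide c4 = true then false else rest) =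
      ((!(decide c1 || decide c2 || decide c3 || decide c4)) && rest) := by
  by_cases h12 : c1 ∨ c2
  · rw [if_pos h12]
    rcases h12 with h | h
    · rw [decide_eq_true h]; rfl
    · rw [decide_eq_true h]
      cases hd : decide c1 <;> rfl
  · rw [if_neg h12]
    have hn1 : decide c1 = false := decide_eq_false (fun h => h12 (Or.inl h))
    have hn2 : decide c2 = false := decide_eq_false (fun h => h12 (Or.inr h))
    rw [hn1, hn2]
    by_cases h3 : c3
    · rw [if_pos h3, decide_eq_true h3]; rfl
    · rw [if_neg h3, decide_eq_false h3]
      cases hd : decide c4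
      · rw [if_neg (by simp)]; rfl
      · rw [if_pos rfl]; rfl

theorem pv_loop_eq (t : List (List (List Int))) (r : List Int) (rs : List (List Int))
    (m : List (Int × Int)) :
    limitsLoopA t (r :: rs) m =
      m.all (fun p =>
        !(decide (p.1 + ((t.getD 1 []).getD 1 []).getD 0 0 < 0) ||
          decide (p.2 + ((t.getD 1 []).getD 1 []).getD 1 0 < 0) ||
          decide (p.2 + ((t.getD 1 []).getD 1 []).getD 1 0 > (((r :: rs).length : Nat) : Int) - 1) ||
          decide (p.1 + ((t.getD 1 []).getD 1 []).getD 0 0 >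
            ((rs.foldl (fun acc row => min acc row.length) r.length : Nat) : Int) - 1))) := by
  induction m with
  | nil => rfl
  | cons p m ih =>
    simp only [limitsLoopA, List.all_cons, pv_inner_eq, pv_chain, ih]

-- ===== VERDICT (by name: the statement is the Claim_ definition above) =====
theorem limits_spec : Claim_equal_limits := by
  intro t m g _ _
  unfold Spec_limits limits
  match m with
  | [] => rfl
  | p :: ps =>
    match g with
    | [] =>
      have hfalse : limitsLoopA t [] (p :: ps) = false := by
        simp only [limitsLoopA]
        by_cases h1 : p.1 + ((t.getD 1 []).getD 1 []).getD 0 0 < 0 ∨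
            p.2 + ((t.getD 1 []).getD 1 []).getD 1 0 < 0
        · rw [if_pos h1]
        · rw [if_neg h1, if_pos]
          simp only [List.length_nil, Nat.cast_zero]
          omega
      rw [hfalse]; rfl
    | r :: rs =>
      rw [pv_loop_eq]; rfl
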